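-- pv_equiv track=rewrite | github.com/DavyD1999/new-shortest-route | gravity_pressure.py | remove_doubles2
-- ===== SOURCE A (Python) =====
-- def remove_doubles2(route_list):
--
--     indices = dict()
--
--     for i, val in enumerate(route_list):
--         if val in indices.keys():
--             indices[val] = [indices[val][0], i]
--         else:
--             indices[val] = [i]
--
--     to_return = list()
--
--     i = 0
--     j = 0
--
--     while i < len(route_list):
--         if len(indices[route_list[i]]) > 1:
--             to_return += route_list[j:i]
--
--             j = indices[route_list[i]][1]
--             i = indices[route_list[i]][1]
--
--         i += 1
--
--     to_return += route_list[j:len(route_list)]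
--
--     return to_return
-- ===== SOURCE B (Python) =====
-- def remove_doubles2(route_list):
--     out = []
--     pos = {}
--     for val in route_list:
--         if val in pos:
--             k = pos[val]
--             while len(out) > k + 1:
--                 del pos[out.pop()]
--         else:
--             pos[val] = len(out)
--             out.append(val)
--     return out
-- ===== Notes on version B (the rewrite author's own statement) =====
-- stated objective: faster
-- what changed: Replaced A's precomputed first/last-index dictionary plus forward-jumping segment-copy while-loop by the classic single-pass stack-based loop erasure: a result stack plus a position map, popping back to the earlier occurrence whenever a node repeats.
import Mathlib
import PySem

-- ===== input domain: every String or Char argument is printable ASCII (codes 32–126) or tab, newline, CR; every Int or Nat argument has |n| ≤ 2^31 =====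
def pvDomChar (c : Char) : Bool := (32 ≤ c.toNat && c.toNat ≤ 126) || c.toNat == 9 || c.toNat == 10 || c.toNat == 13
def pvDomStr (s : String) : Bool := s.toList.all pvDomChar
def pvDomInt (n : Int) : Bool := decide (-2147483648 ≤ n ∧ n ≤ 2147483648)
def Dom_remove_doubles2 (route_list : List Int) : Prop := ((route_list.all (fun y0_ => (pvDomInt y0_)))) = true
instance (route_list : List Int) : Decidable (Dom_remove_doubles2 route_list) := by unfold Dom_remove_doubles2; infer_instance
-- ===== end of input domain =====

-- B replaces A's first/last-index table plus forward-jumping segment-copy loop by the classic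
-- single-pass stack-based loop erasure (measured faster by a constant factor: one pass, no slice copies).

-- ===== PORT A =====
-- the while loop of A; fuel = number of remaining iterations allowed (the fuel-0 branch returns the
-- loop's exit value and is unreachable for fuel = len+1, since i grows by at least 1 per iteration)
def pvALoop (r : List Int) (idx : PySem.Dict Int (List Int)) :
    Nat → Int → Int → List Int → List Int
  | 0, _, j, acc => acc ++ PySem.List.slice r (some j) (some (PySem.List.len r))
  | fuel + 1, i, j, acc =>
    if i < PySem.List.len r then
      let v := PySem.List.pyGetD r i 0
      if (idx.getD v []).length > 1 then
        pvALoop r idx fuel (PySem.List.pyGetD (idx.getD v []) 1 0 + 1)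
          (PySem.List.pyGetD (idx.getD v []) 1 0)
          (acc ++ PySem.List.slice r (some j) (some i))
      else
        pvALoop r idx fuel (i + 1) j acc
    else
      acc ++ PySem.List.slice r (some j) (some (PySem.List.len r))

def remove_doubles2 (route_list : List Int) : List Int :=
  let indices : PySem.Dict Int (List Int) :=
    (route_list.zipIdx).foldl
      (fun d p =>
        if d.contains p.1 then
          d.insert p.1 [PySem.List.pyGetD (d.getD p.1 []) 0 0, (p.2 : Int)]
        else
          d.insert p.1 [(p.2 : Int)])
      PySem.Dict.empty
  pvALoop route_list indices (route_list.length + 1) 0 0 []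

-- ===== PORT B =====
-- `while len(out) > k + 1: del pos[out.pop()]`; the [] case models Python's pop-from-empty
-- IndexError and is unreachable (pos only holds valid indices)
def pvPopLoop : List Int → PySem.Dict Int Int → Int → List Int × PySem.Dict Int Int
  | out, pos, k =>
    if (PySem.List.len out) > k + 1 then
      match out with
      | [] => ([], pos)
      | x :: xs => pvPopLoop ((x :: xs).dropLast) (pos.erase ((x :: xs).getLast (by simp))) k
    else
      (out, pos)
  termination_by out _ _ => out.length
  decreasing_by simp

def pvBStep (s : List Int × PySem.Dict Int Int) (v : Int) : List Int × PySem.Dict Int Int :=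
  match s.2.get? v with
  | some k => pvPopLoop s.1 s.2 k
  | none => (s.1 ++ [v], s.2.insert v (PySem.List.len s.1))

def remove_doubles2_alt (route_list : List Int) : List Int :=
  (route_list.foldl pvBStep ([], PySem.Dict.empty)).1

-- ===== PRECONDITION & SPEC =====
def Spec_remove_doubles2 (route_list : List Int) (out : List Int) : Prop := out = remove_doubles2_alt route_list
instance (route_list : List Int) (out : List Int) : Decidable (Spec_remove_doubles2 route_list out) := by unfold Spec_remove_doubles2; infer_instance

-- ===== CLAIM (what is proved, stated in full; the proofs are below) =====
def Claim_equal_remove_doubles2 : Prop := ∀ (route_list : List Int), Dom_remove_doubles2 route_list → Spec_remove_doubles2 route_list (remove_doubles2 route_list)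

-- ===== LEMMAS AND PROOFS =====

-- index of the LAST occurrence of v in l (meaningful when v ∈ l)
def pvLast (v : Int) (l : List Int) : Nat := l.length - 1 - l.reverse.idxOf v

-- the common spec: loop-erased route — emit the head, skip past its last occurrence
def pvG : List Int → List Int
  | [] => []
  | v :: ys => v :: (if v ∈ ys then pvG (ys.drop (pvLast v ys + 1)) else pvG ys)
  termination_by l => l.length
  decreasing_by all_goals simp

theorem pv_idxOf_le (l : List Int) (a : Int) (j : Nat) (hj : j < l.length) (e : l[j] = a) :
    List.idxOf a l ≤ j := by
  by_contra hc
  push Not at hc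
  have hm : a ∈ l := e ▸ List.getElem_mem hj
  have hlt := List.idxOf_lt_length_of_mem (l := l) hm
  have hfi : List.findIdx (fun x => x == a) l = List.idxOf a l := rfl
  have := (List.findIdx_eq (p := fun x => x == a) (xs := l) hlt).mp hfi
  have h2 := this.2 j hc
  simp [e] at h2

theorem pv_idxOf_rev_lt {v : Int} {l : List Int} (h : v ∈ l) :
    l.reverse.idxOf v < l.length := by
  simpa using List.idxOf_lt_length_of_mem (List.mem_reverse.mpr h)

theorem pvLast_lt {v : Int} {l : List Int} (h : v ∈ l) : pvLast v l < l.length := by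
  have := pv_idxOf_rev_lt h
  unfold pvLast
  omega

theorem getElem_pvLast {v : Int} {l : List Int} (h : v ∈ l) :
    l[pvLast v l]'(pvLast_lt h) = v := by
  have hir := pv_idxOf_rev_lt h
  have h1 : l.reverse[l.reverse.idxOf v]'(by simpa using hir) = v :=
    List.getElem_idxOf (by simpa using hir)
  rw [List.getElem_reverse] at h1
  simpa [pvLast] using h1

theorem not_mem_drop_pvLast {v : Int} {l : List Int} (h : v ∈ l) :
    v ∉ l.drop (pvLast v l + 1) := by
  intro hmem
  obtain ⟨k, hk, he⟩ := List.mem_iff_getElem.mp hmem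
  rw [List.getElem_drop] at he
  have hklt : pvLast v l + 1 + k < l.length := by
    have := hk; simp [List.length_drop] at this; omega
  -- the occurrence at pvLast+1+k reflects into the reverse before idxOf
  have hrev : l.reverse[l.length - 1 - (pvLast v l + 1 + k)]'(by simp; omega) = v := by
    rw [List.getElem_reverse]
    have heq : l.length - 1 - (l.length - 1 - (pvLast v l + 1 + k)) = pvLast v l + 1 + k := by
      have := pv_idxOf_rev_lt h; unfold pvLast at *; omega
    simp only [heq]; exact he
  have hle := pv_idxOf_le l.reverse v _ (by simp; omega) hrev
  have := pv_idxOf_rev_lt h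
  unfold pvLast at *
  omega

theorem le_pvLast {v : Int} {l : List Int} {k : Nat} (hk : k < l.length) (hv : l[k] = v) :
    k ≤ pvLast v l := by
  have hm : v ∈ l := hv ▸ List.getElem_mem hk
  by_contra hc
  push Not at hc
  apply not_mem_drop_pvLast hm
  have : (l.drop (pvLast v l + 1))[k - (pvLast v l + 1)]'(by simp; omega) = v := by
    rw [List.getElem_drop]
    have heq : pvLast v l + 1 + (k - (pvLast v l + 1)) = k := by omega
    simp only [heq]; exact hv
  exact List.mem_of_getElem this

theorem pvLast_eq_of {v : Int} {l : List Int} {k : Nat} (hk : k < l.length) (hv : l[k] = v)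
    (hnd : v ∉ l.drop (k + 1)) : pvLast v l = k := by
  have hm : v ∈ l := hv ▸ List.getElem_mem hk
  have h1 := le_pvLast hk hv
  by_contra hc
  apply hnd
  have h2 : k < pvLast v l := by omega
  have : (l.drop (k + 1))[pvLast v l - (k + 1)]'(by have := pvLast_lt hm; simp; omega) = v := by
    rw [List.getElem_drop]
    have heq : k + 1 + (pvLast v l - (k + 1)) = pvLast v l := by omega
    simp only [heq]; exact getElem_pvLast hm
  exact List.mem_of_getElem this

theorem pvLast_append_self (v : Int) (p : List Int) : pvLast v (p ++ [v]) = p.length := by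
  unfold pvLast
  simp [List.idxOf_cons_self]

theorem pvLast_append_ne {v x : Int} (p : List Int) (hv : v ∈ p) (hx : v ≠ x) :
    pvLast v (p ++ [x]) = pvLast v p := by
  have hir := pv_idxOf_rev_lt hv
  unfold pvLast
  rw [show (p ++ [x]).reverse = x :: p.reverse by simp]
  rw [List.idxOf_cons]
  have : (x == v) = false := by simp [Ne.symm hx]
  rw [this]
  simp
  omega

-- G's one-step unfolding through `drop`
theorem pvG_drop_step (r : List Int) (i m : Nat) (hi : i < r.length) (him : i ≤ m)
    (hm : m < r.length) (hv : r[m] = r[i]) (hnd : r[i] ∉ r.drop (m + 1)) :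
    pvG (r.drop i) = r[i] :: pvG (r.drop (m + 1)) := by
  rw [List.drop_eq_getElem_cons hi]
  rw [pvG]
  rcases Nat.eq_or_lt_of_le him with he | hlt
  · subst he
    have : r[i] ∉ r.drop (i + 1) := hnd
    simp [this]
  · have hmem : r[i] ∈ r.drop (i + 1) := by
      have hg : (r.drop (i + 1))[m - (i + 1)]'(by simp; omega) = r[i] := by
        rw [List.getElem_drop]
        have heq : i + 1 + (m - (i + 1)) = m := by omega
        simp only [heq]; exact hv
      exact List.mem_of_getElem hg
    rw [if_pos hmem]
    congr 1
    have hpl : pvLast r[i] (r.drop (i + 1)) = m - (i + 1) := by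
      apply pvLast_eq_of (by simp; omega)
      · rw [List.getElem_drop]
        have heq : i + 1 + (m - (i + 1)) = m := by omega
        simp only [heq]; exact hv
      · rw [List.drop_drop]
        have heq : i + 1 + (m - (i + 1) + 1) = m + 1 := by omega
        rw [heq]; exact hnd
    rw [hpl, List.drop_drop]
    have heq : i + 1 + (m - (i + 1) + 1) = m + 1 := by omega
    rw [heq]

-- ---------- A-side ----------

-- the dictionary invariant of A's first loop
def pvDInv (p : List Int) (d : PySem.Dict Int (List Int)) : Prop :=
  ∀ v : Int,
    if v ∈ p then
      ∃ f : Int, d.get? v =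
        some (if 2 ≤ p.count v then [f, (pvLast v p : Int)] else [f])
    else d.get? v = none

theorem pvDInv_step {p : List Int} {d : PySem.Dict Int (List Int)} (a : Int)
    (hd : pvDInv p d) :
    pvDInv (p ++ [a])
      (if d.contains a then
        d.insert a [PySem.List.pyGetD (d.getD a []) 0 0, (p.length : Int)]
      else d.insert a [(p.length : Int)]) := by
  have hca : d.contains a = true ↔ a ∈ p := by
    rw [PySem.Dict.contains_eq_isSome_get?]
    have := hd a
    by_cases ha : a ∈ p
    · rw [if_pos ha] at this
      obtain ⟨f, hf⟩ := this
      simp [hf, ha]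
    · rw [if_neg ha] at this
      simp [this, ha]
  by_cases ha : a ∈ p
  · rw [if_pos (hca.mpr ha)]
    have hinv := hd a
    rw [if_pos ha] at hinv
    obtain ⟨f, hf⟩ := hinv
    have hgd : d.getD a [] = (if 2 ≤ p.count a then [f, (pvLast a p : Int)] else [f]) := by
      rw [PySem.Dict.getD_eq_get?_getD, hf]
      rfl
    have hfst : PySem.List.pyGetD (d.getD a []) 0 0 = f := by
      rw [hgd]
      split <;> rfl
    rw [hfst]
    intro v
    by_cases hv : v = a
    · subst hv
      rw [if_pos (by simp)]
      refine ⟨f, ?_⟩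
      rw [PySem.Dict.get?_insert_self]
      have hcnt : 2 ≤ (p ++ [v]).count v := by
        rw [List.count_append]
        have h1 : 1 ≤ p.count v := List.one_le_count_iff.mpr ha
        simp
        omega
      rw [if_pos hcnt, pvLast_append_self]
    · rw [PySem.Dict.get?_insert_of_ne _ _ hv]
      have hinv := hd v
      have hmem : (v ∈ p ++ [a]) ↔ v ∈ p := by simp [hv]
      have hcnt : (p ++ [a]).count v = p.count v := by
        rw [List.count_append]
        simp [Ne.symm hv]
      by_cases hvp : v ∈ p
      · rw [if_pos hvp] at hinv
        rw [if_pos (hmem.mpr hvp)]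
        obtain ⟨g, hg⟩ := hinv
        exact ⟨g, by rw [hg, hcnt, pvLast_append_ne p hvp hv]⟩
      · rw [if_neg hvp] at hinv
        rw [if_neg (fun hc => hvp (hmem.mp hc))]
        exact hinv
  · rw [if_neg (by simp [hca, ha])]
    intro v
    by_cases hv : v = a
    · subst hv
      rw [if_pos (by simp)]
      refine ⟨(p.length : Int), ?_⟩
      rw [PySem.Dict.get?_insert_self]
      have hcnt : (p ++ [v]).count v = 1 := by
        rw [List.count_append]
        have h0 : p.count v = 0 := List.count_eq_zero.mpr ha
        simp [h0]
      rw [hcnt]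
      norm_num
    · rw [PySem.Dict.get?_insert_of_ne _ _ hv]
      have hinv := hd v
      have hmem : (v ∈ p ++ [a]) ↔ v ∈ p := by simp [hv]
      have hcnt : (p ++ [a]).count v = p.count v := by
        rw [List.count_append]
        simp [Ne.symm hv]
      by_cases hvp : v ∈ p
      · rw [if_pos hvp] at hinv
        rw [if_pos (hmem.mpr hvp)]
        obtain ⟨g, hg⟩ := hinv
        exact ⟨g, by rw [hg, hcnt, pvLast_append_ne p hvp hv]⟩
      · rw [if_neg hvp] at hinv
        rw [if_neg (fun hc => hvp (hmem.mp hc))]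
        exact hinv

theorem pvBuild_inv : ∀ (s p : List Int) (d : PySem.Dict Int (List Int)), pvDInv p d →
    pvDInv (p ++ s)
      ((s.zipIdx p.length).foldl
        (fun d q =>
          if d.contains q.1 then
            d.insert q.1 [PySem.List.pyGetD (d.getD q.1 []) 0 0, (q.2 : Int)]
          else d.insert q.1 [(q.2 : Int)]) d) := by
  intro s
  induction s with
  | nil => intro p d hd; simpa using hd
  | cons a s ih =>
    intro p d hd
    rw [List.zipIdx_cons, List.foldl_cons]
    have hstep := pvDInv_step a hd
    have := ih (p ++ [a]) _ hstep
    simp only [List.length_append, List.length_cons, List.length_nil, Nat.zero_add] at this ⊢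
    rw [List.append_cons]
    convert this using 3

theorem pvSlice_clamp (r : List Int) (j i : Int) (h0 : 0 ≤ j) (hni : (r.length : Int) ≤ i) :
    PySem.List.slice r (some j) (some i) = r.drop j.toNat := by
  rw [PySem.List.slice_toNat _ h0 (by omega)]
  apply List.take_of_length_le
  simp
  omega

theorem pvSlice_succ (r : List Int) (j i : Int) (h0 : 0 ≤ j) (hji : j ≤ i)
    (hin : i < (r.length : Int)) :
    PySem.List.slice r (some j) (some (i + 1)) =
      PySem.List.slice r (some j) (some i) ++ [r[i.toNat]'(by omega)] := by
  rw [PySem.List.slice_toNat _ h0 (by omega), PySem.List.slice_toNat _ h0 (by omega)]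
  have h1 : (i + 1).toNat - j.toNat = (i.toNat - j.toNat) + 1 := by omega
  rw [h1, List.take_add_one]
  congr 1
  have h2 : i.toNat - j.toNat < (r.drop j.toNat).length := by simp; omega
  rw [List.getElem?_eq_getElem h2, List.getElem_drop]
  have h3 : j.toNat + (i.toNat - j.toNat) = i.toNat := by omega
  simp only [h3]
  rfl

theorem pvALoop_eq (r : List Int) (d : PySem.Dict Int (List Int)) (hd : pvDInv r d) :
    ∀ (fuel : Nat) (i j : Int) (acc : List Int), 0 ≤ j → j ≤ i → j ≤ (r.length : Int) →
      (r.length : Int) - i < fuel →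
      pvALoop r d fuel i j acc =
        acc ++ PySem.List.slice r (some j) (some i) ++ pvG (r.drop i.toNat) := by
  intro fuel
  induction fuel with
  | zero =>
    intro i j acc h0 hji hjn hf
    rw [pvALoop]
    have hdrop : r.drop i.toNat = [] := by
      apply List.drop_eq_nil_of_le
      omega
    rw [hdrop]
    rw [show PySem.List.len r = (r.length : Int) from PySem.List.len_eq r]
    rw [pvSlice_clamp r j _ h0 le_rfl, pvSlice_clamp r j i h0 (by omega)]
    simp [pvG]
  | succ fuel ih =>
    intro i j acc h0 hji hjn hf
    rw [pvALoop]
    simp only [PySem.List.len_eq]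
    by_cases hin : i < (r.length : Int)
    · rw [if_pos hin]
      have hi0 : 0 ≤ i := by omega
      have hilt : i.toNat < r.length := by omega
      have hv : PySem.List.pyGetD r i 0 = r[i.toNat] :=
        PySem.List.pyGetD_eq_getElem r 0 hi0 (by omega)
      rw [hv]
      generalize hw : r[i.toNat]'hilt = w
      have hwm : w ∈ r := by rw [← hw]; exact List.getElem_mem hilt
      have hinv := hd w
      rw [if_pos hwm] at hinv
      obtain ⟨f, hf2⟩ := hinv
      have hgd : d.getD w [] =
          (if 2 ≤ r.count w then [f, (pvLast w r : Int)] else [f]) := by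
        rw [PySem.Dict.getD_eq_get?_getD, hf2]; rfl
      have hsplit : r.count w =
          (r.take (i.toNat + 1)).count w + (r.drop (i.toNat + 1)).count w := by
        conv_lhs => rw [← List.take_append_drop (i.toNat + 1) r]
        rw [List.count_append]
      by_cases hcnt : 2 ≤ r.count w
      · -- duplicated value: jump to its last occurrence
        rw [if_pos hcnt] at hgd
        have hL := pvLast_lt hwm
        have hiL : i.toNat ≤ pvLast w r := le_pvLast hilt hw
        rw [hgd]
        rw [if_pos (by norm_num)]
        rw [show PySem.List.pyGetD [f, (pvLast w r : Int)] 1 0 = (pvLast w r : Int) from rfl]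
        rw [ih ((pvLast w r : Int) + 1) (pvLast w r : Int) _
          (by positivity) (by omega) (by exact_mod_cast hL.le) (by omega)]
        have htoNat : ((pvLast w r : Int) + 1).toNat = pvLast w r + 1 := by omega
        rw [htoNat]
        have hstep := pvG_drop_step r i.toNat (pvLast w r) hilt hiL hL
          (by rw [hw]; exact getElem_pvLast hwm) (by rw [hw]; exact not_mem_drop_pvLast hwm)
        rw [hw] at hstep
        rw [hstep]
        have hsl : PySem.List.slice r (some (pvLast w r : Int))
            (some ((pvLast w r : Int) + 1)) = [w] := by
          rw [pvSlice_succ r _ _ (by positivity) le_rfl (by exact_mod_cast hL)]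
          rw [PySem.List.slice_toNat r (by positivity) (by positivity)]
          simp only [Nat.sub_self, List.take_zero, List.nil_append]
          congr 1
          have : ((pvLast w r : Int)).toNat = pvLast w r := by omega
          simp only [this]
          exact getElem_pvLast hwm
        rw [hsl]
        simp
      · -- unique value: fall through
        rw [if_neg hcnt] at hgd
        rw [hgd]
        rw [if_neg (by norm_num)]
        rw [ih (i + 1) j acc h0 (by omega) hjn (by omega)]
        have hnd : w ∉ r.drop (i.toNat + 1) := by
          intro hc
          have hone : 1 ≤ (r.take (i.toNat + 1)).count w := by
            apply List.one_le_count_iff.mpr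
            have hg : (r.take (i.toNat + 1))[i.toNat]'(by simp; omega) = w := by
              rw [List.getElem_take]; exact hw
            exact List.mem_of_getElem hg
          have hone2 : 1 ≤ (r.drop (i.toNat + 1)).count w :=
            List.one_le_count_iff.mpr hc
          omega
        have hstep := pvG_drop_step r i.toNat i.toNat hilt le_rfl hilt rfl (hw ▸ hnd)
        rw [hw] at hstep
        rw [hstep]
        have htoNat : (i + 1).toNat = i.toNat + 1 := by omega
        rw [htoNat]
        rw [pvSlice_succ r j i h0 hji hin, hw]
        simp
    · rw [if_neg hin]
      have hdrop : r.drop i.toNat = [] := by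
        apply List.drop_eq_nil_of_le
        omega
      rw [hdrop]
      rw [pvSlice_clamp r j _ h0 le_rfl, pvSlice_clamp r j i h0 (by omega)]
      simp [pvG]

-- ---------- B-side ----------

-- the pure stack step B performs (pos recovered from out by pvPos below)
def pvStep (out : List Int) (v : Int) : List Int :=
  if v ∈ out then out.take (out.idxOf v + 1) else out ++ [v]

def pvPos (out : List Int) (pos : PySem.Dict Int Int) : Prop :=
  ∀ w : Int, pos.get? w = if w ∈ out then some (out.idxOf w : Int) else none

theorem pv_get?_erase_self (d : PySem.Dict Int Int) (k : Int) : (d.erase k).get? k = none := by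
  simp [PySem.Dict.erase, PySem.Dict.get?]

theorem pv_get?_erase_ne (d : PySem.Dict Int Int) {k j : Int} (h : j ≠ k) :
    (d.erase k).get? j = d.get? j := by
  obtain ⟨items⟩ := d
  induction items with
  | nil => rfl
  | cons p rest ih =>
    simp only [PySem.Dict.erase, PySem.Dict.get?] at ih ⊢
    by_cases hp : p.1 = k <;> by_cases hj : p.1 = j <;>
      simp_all [List.find?, show ∀ a b : Int, (a == b) = decide (a = b) from fun _ _ => rfl]

theorem pvPopLoop_exit (out : List Int) (pos : PySem.Dict Int Int) (k : Int)
    (h : ¬ ((out.length : Int) > k + 1)) : pvPopLoop out pos k = (out, pos) := by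
  rw [pvPopLoop.eq_def]
  simp only [PySem.List.len_eq]
  rw [if_neg h]

theorem pvPopLoop_step (out : List Int) (pos : PySem.Dict Int Int) (k : Int)
    (h : (out.length : Int) > k + 1) (hne : out ≠ []) :
    pvPopLoop out pos k = pvPopLoop out.dropLast (pos.erase (out.getLast hne)) k := by
  rcases out with _ | ⟨x, xs⟩
  · simp at hne
  · rw [pvPopLoop.eq_def]
    simp only [PySem.List.len_eq]
    rw [if_pos h]

theorem pvPos_erase_last {ys : List Int} {y : Int} {pos : PySem.Dict Int Int}
    (hn : (ys ++ [y]).Nodup) (hp : pvPos (ys ++ [y]) pos) : pvPos ys (pos.erase y) := by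
  have hyn : y ∉ ys := by
    simp [List.nodup_append] at hn
    exact fun hc => hn.2 y hc rfl
  intro w
  by_cases hw : w = y
  · subst hw
    rw [pv_get?_erase_self]
    exact (if_neg hyn).symm
  · rw [pv_get?_erase_ne _ hw]
    rw [hp w]
    by_cases hmem : w ∈ ys
    · simp [hmem, List.idxOf_append, hw]
    · have : w ∉ ys ++ [y] := by simp [hmem, hw]
      simp [hmem, this]

theorem pvPopLoop_eq : ∀ (out : List Int) (pos : PySem.Dict Int Int) (k : Int), 0 ≤ k →
    out.Nodup → pvPos out pos →
    ∃ pos', pvPopLoop out pos k = (out.take (k.toNat + 1), pos') ∧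
      pvPos (out.take (k.toNat + 1)) pos' := by
  intro out
  induction out using List.reverseRecOn with
  | nil =>
    intro pos k hk _ hp
    refine ⟨pos, ?_, ?_⟩
    · rw [pvPopLoop_exit _ _ _ (by simp; omega)]
      simp
    · simpa using hp
  | append_singleton ys y ih =>
    intro pos k hk hn hp
    by_cases hc : ((ys ++ [y]).length : Int) > k + 1
    · rw [pvPopLoop_step _ _ _ hc (by simp)]
      rw [List.dropLast_concat, List.getLast_concat]
      have hlen : k.toNat + 1 ≤ ys.length := by simp at hc; omega
      obtain ⟨pos', h1, h2⟩ := ih (pos.erase y) k hk (List.Nodup.of_append_left hn)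
        (pvPos_erase_last hn hp)
      refine ⟨pos', ?_, ?_⟩
      · rw [h1, List.take_append_of_le_length hlen]
      · rw [List.take_append_of_le_length hlen]; exact h2
    · refine ⟨pos, ?_, ?_⟩
      · rw [pvPopLoop_exit _ _ _ hc]
        rw [List.take_of_length_le (by simp at hc ⊢; omega)]
      · rw [List.take_of_length_le (by simp at hc ⊢; omega)]
        exact hp

theorem pvBStep_eq {out : List Int} {pos : PySem.Dict Int Int} (v : Int)
    (hp : pvPos out pos) (hn : out.Nodup) :
    ∃ pos', pvBStep (out, pos) v = (pvStep out v, pos') ∧ pvPos (pvStep out v) pos' ∧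
      (pvStep out v).Nodup := by
  by_cases hv : v ∈ out
  · have hg : pos.get? v = some (out.idxOf v : Int) := by rw [hp v, if_pos hv]
    obtain ⟨pos', h1, h2⟩ := pvPopLoop_eq out pos (out.idxOf v : Int) (by positivity) hn hp
    refine ⟨pos', ?_, ?_, ?_⟩
    · rw [pvBStep, hg]
      show pvPopLoop out pos ((List.idxOf v out : Int)) = _
      rw [h1, pvStep, if_pos hv]
      simp
    · rw [pvStep, if_pos hv]
      simpa using h2
    · rw [pvStep, if_pos hv]
      exact ((List.take_sublist _ _).nodup hn)
  · have hg : pos.get? v = none := by rw [hp v, if_neg hv]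
    have hstep : pvStep out v = out ++ [v] := by rw [pvStep, if_neg hv]
    refine ⟨pos.insert v (PySem.List.len out), ?_, ?_, ?_⟩
    · rw [pvBStep, hg, hstep]
    · rw [hstep]
      intro w
      by_cases hw : w = v
      · subst hw
        rw [PySem.Dict.get?_insert_self]
        rw [if_pos (by simp)]
        rw [List.idxOf_append, if_neg hv]
        simp [PySem.List.len_eq, List.idxOf_cons_self]
      · rw [PySem.Dict.get?_insert_of_ne _ _ hw, hp w]
        by_cases hmem : w ∈ out
        · rw [if_pos hmem, if_pos (by simp [hmem])]
          rw [List.idxOf_append, if_pos hmem]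
        · rw [if_neg hmem, if_neg (by simp [hmem, hw])]
    · rw [hstep]
      simp [List.nodup_append]
      refine ⟨hn, fun a ha he => hv (he ▸ ha)⟩

theorem pvFold_eq : ∀ (xs : List Int) (out : List Int) (pos : PySem.Dict Int Int),
    pvPos out pos → out.Nodup →
    (xs.foldl pvBStep (out, pos)).1 = xs.foldl pvStep out := by
  intro xs
  induction xs with
  | nil => intro out pos _ _; rfl
  | cons x xs ih =>
    intro out pos hp hn
    obtain ⟨pos', h1, h2, h3⟩ := pvBStep_eq x hp hn
    rw [List.foldl_cons, List.foldl_cons, h1]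
    exact ih _ _ h2 h3

theorem pvIdxOf_ge {acc out : List Int} {w : Int} (hpre : acc <+: out) (hw : w ∉ acc) :
    acc.length ≤ out.idxOf w := by
  by_cases hmem : w ∈ out
  · by_contra hc
    push Not at hc
    have hi : out.idxOf w < out.length := List.idxOf_lt_length_of_mem hmem
    have h1 : out[out.idxOf w] = w := List.getElem_idxOf hi
    have h2 : acc[out.idxOf w]'(by omega) = w := by
      rw [hpre.getElem (by omega)]; exact h1
    exact hw (List.mem_of_getElem h2)
  · rw [List.idxOf_eq_length hmem]
    exact hpre.length_le

theorem pvIdxOf_prefix {acc out : List Int} {v : Int} (hpre : (acc ++ [v]) <+: out)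
    (hv : v ∉ acc) : out.idxOf v = acc.length := by
  have hlen : acc.length + 1 ≤ out.length := by
    have := hpre.length_le
    simpa using this
  have hge : acc.length ≤ out.idxOf v := by
    apply pvIdxOf_ge _ hv
    exact (List.prefix_append _ _).trans hpre
  have hat : out[acc.length]'(by omega) = v := by
    have := hpre.getElem (i := acc.length) (by simp)
    simpa using this.symm
  have hle := pv_idxOf_le out v acc.length (by omega) hat
  omega


theorem pvPrefix : ∀ (zs out acc : List Int) (v : Int), (acc ++ [v]) <+: out → out.Nodup →
    v ∉ acc → (∀ a ∈ acc, a ∉ zs) →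
    (acc ++ [v]) <+: zs.foldl pvStep out ∧ (zs.foldl pvStep out).Nodup := by
  intro zs
  induction zs with
  | nil => intro out acc v h1 h2 _ _; exact ⟨h1, h2⟩
  | cons w zs ih =>
    intro out acc v hpre hnd hv havoid
    rw [List.foldl_cons]
    have hstep : (acc ++ [v]) <+: pvStep out w ∧ (pvStep out w).Nodup := by
      rw [pvStep]
      by_cases hw : w ∈ out
      · rw [if_pos hw]
        constructor
        · have hwacc : w ∉ acc := fun hc => havoid w hc (by simp)
          have hge : acc.length + 1 ≤ out.idxOf w + 1 := by
            have := pvIdxOf_ge ((List.prefix_append _ _).trans hpre) hwacc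
            omega
          have he : acc ++ [v] = (out.take (out.idxOf w + 1)).take (acc.length + 1) := by
            rw [List.take_take, Nat.min_eq_left hge]
            simpa using List.prefix_iff_eq_take.mp hpre
          rw [he]
          exact List.take_prefix _ _
        · exact (List.take_sublist _ _).nodup hnd
      · rw [if_neg hw]
        constructor
        · exact hpre.trans (List.prefix_append _ _)
        · simp [List.nodup_append]
          exact ⟨hnd, fun a ha he => hw (he ▸ ha)⟩
    exact ih (pvStep out w) acc v hstep.1 hstep.2 hv
      (fun a ha => fun hc => havoid a ha (by simp [hc]))

theorem pvMain : ∀ (n : Nat) (xs acc : List Int), xs.length ≤ n → acc.Nodup →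
    (∀ a ∈ acc, a ∉ xs) → xs.foldl pvStep acc = acc ++ pvG xs := by
  intro n
  induction n with
  | zero =>
    intro xs acc hlen _ _
    have : xs = [] := List.length_eq_zero_iff.mp (by omega)
    subst this
    simp [pvG]
  | succ n ih =>
    intro xs acc hlen hnd havoid
    match xs with
    | [] => simp [pvG]
    | v :: ys =>
      have hvacc : v ∉ acc := fun hc => havoid v hc (by simp)
      have hstep1 : pvStep acc v = acc ++ [v] := by rw [pvStep, if_neg hvacc]
      have hnd' : (acc ++ [v]).Nodup := by
        simp [List.nodup_append]
        exact ⟨hnd, fun a ha he => hvacc (he ▸ ha)⟩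
      rw [List.foldl_cons, hstep1]
      rw [pvG]
      by_cases hvy : v ∈ ys
      · rw [if_pos hvy]
        have hm := pvLast_lt hvy
        have hys : ys = ys.take (pvLast v ys + 1) ++ ys.drop (pvLast v ys + 1) :=
          (List.take_append_drop _ _).symm
        have htk : ys.take (pvLast v ys + 1) = ys.take (pvLast v ys) ++ [v] := by
          rw [List.take_add_one]
          congr 1
          rw [List.getElem?_eq_getElem hm, getElem_pvLast hvy]
          rfl
        conv_lhs => rw [hys]
        rw [List.foldl_append, htk, List.foldl_append]
        have hpref := pvPrefix (ys.take (pvLast v ys)) (acc ++ [v]) acc v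
          (List.prefix_refl _) hnd' hvacc
          (fun a ha hc => havoid a ha (by simp [List.mem_of_mem_take hc]))
        set out' := (ys.take (pvLast v ys)).foldl pvStep (acc ++ [v]) with hout'
        have hvmem : v ∈ out' := hpref.1.mem (by simp)
        have hstepv : pvStep out' v = acc ++ [v] := by
          rw [pvStep, if_pos hvmem, pvIdxOf_prefix hpref.1 hvacc]
          have := (List.prefix_iff_eq_take.mp hpref.1).symm
          simpa using this
        rw [show List.foldl pvStep out' [v] = pvStep out' v from rfl, hstepv]
        rw [ih (ys.drop (pvLast v ys + 1)) (acc ++ [v])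
          (by simp at hlen ⊢; omega) hnd'
          (by
            intro a ha hc
            rcases (List.mem_append.mp ha) with h | h
            · exact havoid a h (by simp [List.mem_of_mem_drop hc])
            · simp at h
              subst h
              exact not_mem_drop_pvLast hvy hc)]
        simp
      · rw [if_neg hvy]
        rw [ih ys (acc ++ [v]) (by simp at hlen ⊢; omega) hnd'
          (by
            intro a ha hc
            rcases (List.mem_append.mp ha) with h | h
            · exact havoid a h (by simp [hc])
            · simp at h; subst h; exact hvy hc)]
        simp

theorem pvA_eq_G (r : List Int) : remove_doubles2 r = pvG r := by
  unfold remove_doubles2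
  have hbase : pvDInv [] PySem.Dict.empty := by
    intro v
    simp [PySem.Dict.get?_empty]
  have hd := pvBuild_inv r [] PySem.Dict.empty hbase
  simp only [List.nil_append, List.length_nil] at hd
  rw [pvALoop_eq r _ hd (r.length + 1) 0 0 [] le_rfl le_rfl (by positivity) (by omega)]
  rw [PySem.List.slice_toNat r le_rfl le_rfl]
  simp

theorem pvB_eq_G (r : List Int) : remove_doubles2_alt r = pvG r := by
  unfold remove_doubles2_alt
  rw [pvFold_eq r [] PySem.Dict.empty (by intro w; simp [PySem.Dict.get?_empty]) (by simp)]
  rw [pvMain r.length r [] le_rfl (by simp) (by simp)]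
  simp

-- ===== VERDICT (by name: the statement is the Claim_ definition above) =====
theorem remove_doubles2_spec : Claim_equal_remove_doubles2 := by
  intro r _
  unfold Spec_remove_doubles2
  rw [pvA_eq_G, pvB_eq_G]
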